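-- pv_equiv track=rewrite | github.com/alexandraback/datacollection | solutions_1595491_0/Python/jilljenn/B.py | fonction
-- ===== SOURCE A (Python) =====
-- def fonction(N, S, p, points):
-- 	nbSurprises = S
-- 	nbChampions = 0
-- 	for n in points:
-- 		if n // 3 >= p or (n // 3 == p - 1 and n % 3 > 0):
-- 			nbChampions += 1
-- 		elif nbSurprises > 0 and ((n // 3 == p - 1 and n > 0 and n % 3 == 0) or (n // 3 == p - 2 and n % 3 == 2)):
-- 			nbChampions += 1
-- 			nbSurprises -= 1
-- 	return nbChampions
-- ===== SOURCE B (Python) =====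
-- def fonction(N, S, p, points):
--     champions = sum(1 for n in points
--                     if n // 3 >= p or (n // 3 == p - 1 and n % 3 > 0))
--     candidates = sum(1 for n in points
--                      if (n // 3 == p - 1 and n > 0 and n % 3 == 0)
--                      or (n // 3 == p - 2 and n % 3 == 2))
--     return champions + min(max(S, 0), candidates)
-- ===== Notes on version B (the rewrite author's own statement) =====
-- stated objective: simpler
-- what changed: Replaces the stateful greedy loop (decrementing a surprise budget in-branch) by two independent counts of champions and surprise-candidates followed by a terminal cap min(max(S,0), candidates), valid because every candidate consumes exactly one surprise regardless of order.
import Mathlib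
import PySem

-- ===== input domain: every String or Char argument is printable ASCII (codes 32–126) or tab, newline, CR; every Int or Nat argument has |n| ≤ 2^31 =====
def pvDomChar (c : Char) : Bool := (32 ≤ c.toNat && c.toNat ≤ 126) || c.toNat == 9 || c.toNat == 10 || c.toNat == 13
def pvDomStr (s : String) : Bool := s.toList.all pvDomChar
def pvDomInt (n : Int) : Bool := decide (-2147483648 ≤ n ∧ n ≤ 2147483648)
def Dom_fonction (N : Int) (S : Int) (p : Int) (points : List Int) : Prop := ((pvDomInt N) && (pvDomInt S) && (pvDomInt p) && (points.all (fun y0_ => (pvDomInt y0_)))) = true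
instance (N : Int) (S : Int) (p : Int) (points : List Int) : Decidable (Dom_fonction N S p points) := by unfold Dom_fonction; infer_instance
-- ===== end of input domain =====

-- B replaces A's stateful greedy loop (in-branch budget decrement) by two independent
-- counts and a terminal cap min(max(S,0), candidates); objective: simpler.

-- shared branch conditions (line-for-line the Python tests)
def champP (p n : Int) : Bool :=
  decide (p ≤ PySem.Int.floordiv n 3) ||
  (decide (PySem.Int.floordiv n 3 = p - 1) && decide (0 < PySem.Int.mod n 3))

def candP (p n : Int) : Bool :=
  (decide (PySem.Int.floordiv n 3 = p - 1) && decide (0 < n) && decide (PySem.Int.mod n 3 = 0)) ||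
  (decide (PySem.Int.floordiv n 3 = p - 2) && decide (PySem.Int.mod n 3 = 2))

-- ===== PORT A =====
def fonctionLoop (p : Int) : List Int → Int → Int → Int
  | [], _, nbChampions => nbChampions
  | n :: rest, nbSurprises, nbChampions =>
    if champP p n then
      fonctionLoop p rest nbSurprises (nbChampions + 1)
    else if decide (0 < nbSurprises) && candP p n then
      fonctionLoop p rest (nbSurprises - 1) (nbChampions + 1)
    else
      fonctionLoop p rest nbSurprises nbChampions

def fonction (N : Int) (S : Int) (p : Int) (points : List Int) : Int :=
  fonctionLoop p points S 0

-- ===== PORT B =====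
def fonction_alt (N : Int) (S : Int) (p : Int) (points : List Int) : Int :=
  let champions : Int := (points.countP (champP p) : Int)
  let candidates : Int := (points.countP (candP p) : Int)
  champions + min (max S 0) candidates

-- ===== PRECONDITION & SPEC =====
def Spec_fonction (N : Int) (S : Int) (p : Int) (points : List Int) (out : Int) : Prop := out = fonction_alt N S p points
instance (N : Int) (S : Int) (p : Int) (points : List Int) (out : Int) : Decidable (Spec_fonction N S p points out) := by unfold Spec_fonction; infer_instance

-- ===== CLAIM (what is proved, stated in full; the proofs are below) =====
def Claim_equal_fonction : Prop := ∀ (N : Int) (S : Int) (p : Int) (points : List Int), Dom_fonction N S p points → Spec_fonction N S p points (fonction N S p points)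

-- ===== LEMMAS AND PROOFS =====

-- a champion is never a surprise candidate (the two branch tests are disjoint)
lemma champ_not_cand (p n : Int) (h : champP p n = true) : candP p n = false := by
  simp only [champP, candP, Bool.or_eq_true, Bool.and_eq_true, Bool.or_eq_false_iff,
    Bool.and_eq_false_iff, decide_eq_true_eq, decide_eq_false_iff_not] at h ⊢
  omega

-- loop invariant: A's loop from state (s, c) adds the champion count plus the
-- capped candidate count
lemma loop_eq (p : Int) (pts : List Int) : ∀ s c : Int,
    fonctionLoop p pts s c =
      c + (pts.countP (champP p) : Int) + min (max s 0) ((pts.countP (candP p) : Int)) := by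
  induction pts with
  | nil => intro s c; simp [fonctionLoop]
  | cons n rest ih =>
    intro s c
    by_cases h1 : champP p n = true
    · have hc := champ_not_cand p n h1
      simp [fonctionLoop, h1, hc, List.countP_cons, ih]
      push_cast
      omega
    · by_cases h2 : candP p n = true
      · by_cases hs : (0 : Int) < s
        · simp [fonctionLoop, h1, h2, hs, ih]
          push_cast
          omega
        · simp [fonctionLoop, h1, h2, hs, ih]
          push_cast
          omega
      · simp [fonctionLoop, h1, h2, ih]

-- ===== VERDICT (by name: the statement is the Claim_ definition above) =====
theorem fonction_spec : Claim_equal_fonction := by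
  intro N S p points _
  unfold Spec_fonction fonction fonction_alt
  simpa using loop_eq p points S 0
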